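-- pv_equiv track=rewrite | github.com/scarecrow405/Mythic-Quest | monsters/monster_fight_logic.py | get_character_level
-- ===== SOURCE A (Python) =====
-- def get_character_level(character_experience):
--     level_thresholds = {
--         1: 100,
--         2: 200,
--         3: 400,
--         4: 800,
--         5: 1600,
--         6: 2500,
--         7: 4000,
--         8: 6400,
--         9: 8100,
--         10: 10000,
--     }
--     level = 1
--
--     for lvl, threshold in level_thresholds.items():
--         if character_experience >= threshold:
--             level = lvl
--     return level
-- ===== SOURCE B (Python) =====
-- def get_character_level(character_experience):
--     thresholds = [100, 200, 400, 800, 1600, 2500, 4000, 6400, 8100, 10000]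
--     # binary search: lo ends as the number of thresholds <= character_experience
--     lo, hi = 0, len(thresholds)
--     while lo < hi:
--         mid = (lo + hi) // 2
--         if character_experience >= thresholds[mid]:
--             lo = mid + 1
--         else:
--             hi = mid
--     return max(1, lo)
-- ===== Notes on version B (the rewrite author's own statement) =====
-- stated objective: alternative
-- what changed: Replaces A's linear scan over all dict items with a hand-written binary search (bisect_right) over a sorted threshold list, returning max(1, count of thresholds met).
import Mathlib
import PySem

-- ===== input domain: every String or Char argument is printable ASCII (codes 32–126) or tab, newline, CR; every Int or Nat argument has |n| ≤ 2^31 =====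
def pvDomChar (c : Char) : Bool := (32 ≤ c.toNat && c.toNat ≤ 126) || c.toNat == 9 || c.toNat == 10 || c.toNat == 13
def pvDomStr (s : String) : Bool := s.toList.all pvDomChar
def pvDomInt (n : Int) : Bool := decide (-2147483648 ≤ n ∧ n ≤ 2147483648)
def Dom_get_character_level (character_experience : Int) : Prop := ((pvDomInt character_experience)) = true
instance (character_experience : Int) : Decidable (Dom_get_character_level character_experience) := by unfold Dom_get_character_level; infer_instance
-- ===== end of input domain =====

-- B replaces A's linear scan over all dict items with a hand-written binary search over
-- the sorted threshold list, returning max(1, count of thresholds met) (alternative algorithm).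


-- ===== PORT A =====
-- A's dict literal has distinct keys, so its .items() is the insertion-order pair list;
-- the for-loop over it is the foldl below.
def get_character_level (character_experience : Int) : Int :=
  let level_thresholds : List (Int × Int) :=
    [(1, 100), (2, 200), (3, 400), (4, 800), (5, 1600),
     (6, 2500), (7, 4000), (8, 6400), (9, 8100), (10, 10000)]
  level_thresholds.foldl
    (fun level p => if character_experience ≥ p.2 then p.1 else level) 1

-- ===== PORT B =====
-- the while-loop of Source B: lo/hi stay nonnegative in Python, so they are Nats here and
-- Nat division `(lo+hi)/2` is exactly Python's `(lo+hi)//2`; indexing via pyGet?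
def bLoop (thresholds : List Int) (character_experience : Int) (lo hi : Nat) : Nat :=
  if lo < hi then
    let mid := (lo + hi) / 2
    if character_experience ≥ (PySem.List.pyGet? thresholds (mid : Int)).getD 0 then
      bLoop thresholds character_experience (mid + 1) hi
    else
      bLoop thresholds character_experience lo mid
  else lo
termination_by hi - lo
decreasing_by all_goals omega

def get_character_level_alt (character_experience : Int) : Int :=
  let thresholds : List Int := [100, 200, 400, 800, 1600, 2500, 4000, 6400, 8100, 10000]
  max 1 ((bLoop thresholds character_experience 0 thresholds.length : Nat) : Int)

-- ===== PRECONDITION & SPEC =====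
def Spec_get_character_level (character_experience : Int) (out : Int) : Prop := out = get_character_level_alt character_experience
instance (character_experience : Int) (out : Int) : Decidable (Spec_get_character_level character_experience out) := by unfold Spec_get_character_level; infer_instance

-- ===== CLAIM (what is proved, stated in full; the proofs are below) =====
def Claim_equal_get_character_level : Prop := ∀ (character_experience : Int), Dom_get_character_level character_experience → Spec_get_character_level character_experience (get_character_level character_experience)

-- ===== LEMMAS AND PROOFS =====

-- ===== VERDICT (by name: the statement is the Claim_ definition above) =====
theorem get_character_level_spec : Claim_equal_get_character_level := by
  intro x _
  unfold Spec_get_character_level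
  rcases lt_or_ge x 100 with h0|h0
  · simp [get_character_level, get_character_level_alt, bLoop,
      show ¬((100:Int) ≤ x) from by omega,
      show ¬((200:Int) ≤ x) from by omega,
      show ¬((400:Int) ≤ x) from by omega,
      show ¬((800:Int) ≤ x) from by omega,
      show ¬((1600:Int) ≤ x) from by omega,
      show ¬((2500:Int) ≤ x) from by omega,
      show ¬((4000:Int) ≤ x) from by omega,
      show ¬((6400:Int) ≤ x) from by omega,
      show ¬((8100:Int) ≤ x) from by omega,
      show ¬((10000:Int) ≤ x) from by omega]
  rcases lt_or_ge x 200 with h1|h1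
  · simp [get_character_level, get_character_level_alt, bLoop,
      show (100:Int) ≤ x from by omega,
      show ¬((200:Int) ≤ x) from by omega,
      show ¬((400:Int) ≤ x) from by omega,
      show ¬((800:Int) ≤ x) from by omega,
      show ¬((1600:Int) ≤ x) from by omega,
      show ¬((2500:Int) ≤ x) from by omega,
      show ¬((4000:Int) ≤ x) from by omega,
      show ¬((6400:Int) ≤ x) from by omega,
      show ¬((8100:Int) ≤ x) from by omega,
      show ¬((10000:Int) ≤ x) from by omega]
  rcases lt_or_ge x 400 with h2|h2
  · simp [get_character_level, get_character_level_alt, bLoop,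
      show (100:Int) ≤ x from by omega,
      show (200:Int) ≤ x from by omega,
      show ¬((400:Int) ≤ x) from by omega,
      show ¬((800:Int) ≤ x) from by omega,
      show ¬((1600:Int) ≤ x) from by omega,
      show ¬((2500:Int) ≤ x) from by omega,
      show ¬((4000:Int) ≤ x) from by omega,
      show ¬((6400:Int) ≤ x) from by omega,
      show ¬((8100:Int) ≤ x) from by omega,
      show ¬((10000:Int) ≤ x) from by omega]
  rcases lt_or_ge x 800 with h3|h3
  · simp [get_character_level, get_character_level_alt, bLoop,
      show (100:Int) ≤ x from by omega,
      show (200:Int) ≤ x from by omega,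
      show (400:Int) ≤ x from by omega,
      show ¬((800:Int) ≤ x) from by omega,
      show ¬((1600:Int) ≤ x) from by omega,
      show ¬((2500:Int) ≤ x) from by omega,
      show ¬((4000:Int) ≤ x) from by omega,
      show ¬((6400:Int) ≤ x) from by omega,
      show ¬((8100:Int) ≤ x) from by omega,
      show ¬((10000:Int) ≤ x) from by omega]
  rcases lt_or_ge x 1600 with h4|h4
  · simp [get_character_level, get_character_level_alt, bLoop,
      show (100:Int) ≤ x from by omega,
      show (200:Int) ≤ x from by omega,
      show (400:Int) ≤ x from by omega,
      show (800:Int) ≤ x from by omega,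
      show ¬((1600:Int) ≤ x) from by omega,
      show ¬((2500:Int) ≤ x) from by omega,
      show ¬((4000:Int) ≤ x) from by omega,
      show ¬((6400:Int) ≤ x) from by omega,
      show ¬((8100:Int) ≤ x) from by omega,
      show ¬((10000:Int) ≤ x) from by omega]
  rcases lt_or_ge x 2500 with h5|h5
  · simp [get_character_level, get_character_level_alt, bLoop,
      show (100:Int) ≤ x from by omega,
      show (200:Int) ≤ x from by omega,
      show (400:Int) ≤ x from by omega,
      show (800:Int) ≤ x from by omega,
      show (1600:Int) ≤ x from by omega,
      show ¬((2500:Int) ≤ x) from by omega,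
      show ¬((4000:Int) ≤ x) from by omega,
      show ¬((6400:Int) ≤ x) from by omega,
      show ¬((8100:Int) ≤ x) from by omega,
      show ¬((10000:Int) ≤ x) from by omega]
  rcases lt_or_ge x 4000 with h6|h6
  · simp [get_character_level, get_character_level_alt, bLoop,
      show (100:Int) ≤ x from by omega,
      show (200:Int) ≤ x from by omega,
      show (400:Int) ≤ x from by omega,
      show (800:Int) ≤ x from by omega,
      show (1600:Int) ≤ x from by omega,
      show (2500:Int) ≤ x from by omega,
      show ¬((4000:Int) ≤ x) from by omega,
      show ¬((6400:Int) ≤ x) from by omega,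
      show ¬((8100:Int) ≤ x) from by omega,
      show ¬((10000:Int) ≤ x) from by omega]
  rcases lt_or_ge x 6400 with h7|h7
  · simp [get_character_level, get_character_level_alt, bLoop,
      show (100:Int) ≤ x from by omega,
      show (200:Int) ≤ x from by omega,
      show (400:Int) ≤ x from by omega,
      show (800:Int) ≤ x from by omega,
      show (1600:Int) ≤ x from by omega,
      show (2500:Int) ≤ x from by omega,
      show (4000:Int) ≤ x from by omega,
      show ¬((6400:Int) ≤ x) from by omega,
      show ¬((8100:Int) ≤ x) from by omega,
      show ¬((10000:Int) ≤ x) from by omega]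
  rcases lt_or_ge x 8100 with h8|h8
  · simp [get_character_level, get_character_level_alt, bLoop,
      show (100:Int) ≤ x from by omega,
      show (200:Int) ≤ x from by omega,
      show (400:Int) ≤ x from by omega,
      show (800:Int) ≤ x from by omega,
      show (1600:Int) ≤ x from by omega,
      show (2500:Int) ≤ x from by omega,
      show (4000:Int) ≤ x from by omega,
      show (6400:Int) ≤ x from by omega,
      show ¬((8100:Int) ≤ x) from by omega,
      show ¬((10000:Int) ≤ x) from by omega]
  rcases lt_or_ge x 10000 with h9|h9
  · simp [get_character_level, get_character_level_alt, bLoop,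
      show (100:Int) ≤ x from by omega,
      show (200:Int) ≤ x from by omega,
      show (400:Int) ≤ x from by omega,
      show (800:Int) ≤ x from by omega,
      show (1600:Int) ≤ x from by omega,
      show (2500:Int) ≤ x from by omega,
      show (4000:Int) ≤ x from by omega,
      show (6400:Int) ≤ x from by omega,
      show (8100:Int) ≤ x from by omega,
      show ¬((10000:Int) ≤ x) from by omega]
  simp [get_character_level, get_character_level_alt, bLoop,
      show (100:Int) ≤ x from by omega,
      show (200:Int) ≤ x from by omega,
      show (400:Int) ≤ x from by omega,
      show (800:Int) ≤ x from by omega,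
      show (1600:Int) ≤ x from by omega,
      show (2500:Int) ≤ x from by omega,
      show (4000:Int) ≤ x from by omega,
      show (6400:Int) ≤ x from by omega,
      show (8100:Int) ≤ x from by omega,
      show (10000:Int) ≤ x from by omega]
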